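-- pv_equiv track=rewrite | github.com/samucj73/Lotoeasy | analise_avancada.py | distancia_entre_aparicoes
-- ===== SOURCE A (Python) =====
-- def distancia_entre_aparicoes(jogos):
--     ultima_aparicao = {d: -1 for d in range(1, 26)}
--     distancias = {d: [] for d in range(1, 26)}
--
--     for idx, (_, _, dezenas) in enumerate(jogos):
--         for d in range(1, 26):
--             if d in dezenas:
--                 if ultima_aparicao[d] != -1:
--                     distancias[d].append(idx - ultima_aparicao[d])
--                 ultima_aparicao[d] = idx
--     return {d: distancias[d] for d in distancias if distancias[d]}
-- ===== SOURCE B (Python) =====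
-- def distancia_entre_aparicoes(jogos):
--     resultado = {}
--     for d in range(1, 26):
--         pos = [idx for idx, (_, _, dezenas) in enumerate(jogos) if d in dezenas]
--         gaps = [b - a for a, b in zip(pos, pos[1:])]
--         if gaps:
--             resultado[d] = gaps
--     return resultado
-- ===== Notes on version B (the rewrite author's own statement) =====
-- stated objective: simpler
-- what changed: Replaces A's single pass threading last-seen-index and distance dicts over all 25 numbers per game by, for each number 1..25, collecting its appearance positions and taking consecutive differences via zip.
import Mathlib
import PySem

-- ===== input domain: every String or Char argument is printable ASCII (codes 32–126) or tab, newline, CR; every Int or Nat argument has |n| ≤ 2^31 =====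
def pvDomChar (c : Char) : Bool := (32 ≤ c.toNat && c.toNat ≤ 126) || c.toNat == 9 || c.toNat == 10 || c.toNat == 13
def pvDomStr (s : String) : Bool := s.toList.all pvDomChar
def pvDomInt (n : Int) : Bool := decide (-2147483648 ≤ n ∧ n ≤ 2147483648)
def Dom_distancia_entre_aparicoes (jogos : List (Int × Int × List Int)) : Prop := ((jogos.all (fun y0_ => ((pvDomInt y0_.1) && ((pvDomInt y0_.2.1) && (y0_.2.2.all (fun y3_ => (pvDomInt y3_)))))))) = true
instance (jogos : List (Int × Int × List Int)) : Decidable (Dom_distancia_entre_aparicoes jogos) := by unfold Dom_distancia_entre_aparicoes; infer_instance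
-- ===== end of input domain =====

-- B replaces A's single pass threading last-seen-index/distance dicts by a per-number
-- collect-positions-then-diff decomposition (objective: simpler; same return value).

-- ===== PORT A =====
-- one iteration of the inner 'for d in range(1, 26)' body
def pvStepA (idx : Int) (dez : List Int)
    (st : PySem.Dict Int Int × PySem.Dict Int (List Int)) (d : Int) :
    PySem.Dict Int Int × PySem.Dict Int (List Int) :=
  if d ∈ dez then
    -- dict lookups ultima_aparicao[d] / distancias[d]: keys 1..25 are always present,
    -- so getD is exact here (KeyError unreachable)
    let ds := if st.1.getD d (-1) ≠ -1
      then st.2.insert d (st.2.getD d [] ++ [idx - st.1.getD d (-1)])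
      else st.2
    (st.1.insert d idx, ds)
  else st

-- the two initial dict comprehensions {d: -1 ...} and {d: [] ...}
def pvInitU : PySem.Dict Int Int :=
  (PySem.List.pyRange 1 26).foldl (fun acc k => acc.insert k (-1)) PySem.Dict.empty
def pvInitD : PySem.Dict Int (List Int) :=
  (PySem.List.pyRange 1 26).foldl (fun acc k => acc.insert k ([] : List Int)) PySem.Dict.empty

-- the main enumerate loop
def pvLoopA (jogos : List (Int × Int × List Int)) :
    PySem.Dict Int Int × PySem.Dict Int (List Int) :=
  (PySem.List.enumerate jogos).foldl
    (fun st p => (PySem.List.pyRange 1 26).foldl (pvStepA p.1 p.2.2.2) st)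
    (pvInitU, pvInitD)

def distancia_entre_aparicoes (jogos : List (Int × Int × List Int)) : List (Int × List Int) :=
  let fin := pvLoopA jogos
  -- {d: distancias[d] for d in distancias if distancias[d]}
  ((fin.2.keys).foldl
      (fun (acc : PySem.Dict Int (List Int)) d =>
        if fin.2.getD d [] ≠ [] then acc.insert d (fin.2.getD d []) else acc)
      PySem.Dict.empty).items

-- ===== PORT B =====
-- pos = [idx for idx, (_, _, dezenas) in enumerate(jogos) if d in dezenas]
def pvPosB (jogos : List (Int × Int × List Int)) (d : Int) : List Int :=
  (PySem.List.enumerate jogos).filterMap (fun p => if d ∈ p.2.2.2 then some p.1 else none)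

def distancia_entre_aparicoes_alt (jogos : List (Int × Int × List Int)) : List (Int × List Int) :=
  ((PySem.List.pyRange 1 26).foldl
      (fun (res : PySem.Dict Int (List Int)) d =>
        let pos := pvPosB jogos d
        let gaps := (pos.zip (PySem.List.slice pos (some 1))).map (fun p => p.2 - p.1)
        if gaps ≠ [] then res.insert d gaps else res)
      PySem.Dict.empty).items

-- ===== PRECONDITION & SPEC =====
def Spec_distancia_entre_aparicoes (jogos : List (Int × Int × List Int)) (out : List (Int × List Int)) : Prop := out = distancia_entre_aparicoes_alt jogos
instance (jogos : List (Int × Int × List Int)) (out : List (Int × List Int)) : Decidable (Spec_distancia_entre_aparicoes jogos out) := by unfold Spec_distancia_entre_aparicoes; infer_instance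

-- ===== CLAIM (what is proved, stated in full; the proofs are below) =====
def Claim_equal_distancia_entre_aparicoes : Prop := ∀ (jogos : List (Int × Int × List Int)), Dom_distancia_entre_aparicoes jogos → Spec_distancia_entre_aparicoes jogos (distancia_entre_aparicoes jogos)

-- ===== LEMMAS AND PROOFS =====

-- consecutive differences, as B computes them (slice pos 1 = drop 1)
def pvGaps (pos : List Int) : List Int :=
  (pos.zip (pos.drop 1)).map (fun p => p.2 - p.1)

lemma pvGaps_append (xs : List Int) (n : Int) :
    pvGaps (xs ++ [n]) =
      pvGaps xs ++ (match xs.getLast? with | none => [] | some a => [n - a]) := by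
  induction xs with
  | nil => simp [pvGaps]
  | cons x xs ih =>
    cases xs with
    | nil => simp [pvGaps]
    | cons y ys =>
      simp only [pvGaps, List.cons_append, List.drop_succ_cons, List.drop_zero,
        List.zip_cons_cons, List.map_cons] at ih ⊢
      rw [List.getLast?_cons_cons, ih]

-- getD through a constant-value insert fold (the initial dict comprehensions)
lemma pvGetD_foldl_insert_const {ν : Type} (L : List Int) (st : PySem.Dict Int ν)
    (v d0 : ν) (d : Int) :
    (L.foldl (fun acc k => acc.insert k v) st).getD d d0 =
      if d ∈ L then v else st.getD d d0 := by
  induction L generalizing st with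
  | nil => simp
  | cons e L ih =>
    simp only [List.foldl_cons, ih, PySem.Dict.getD_insert, List.mem_cons]
    by_cases hL : d ∈ L <;> by_cases he : d = e <;> simp [hL, he]

-- pvStepA at a key ≠ d does not change the two lookups at d
lemma pvStepA_getD_ne (idx : Int) (dez : List Int) (st) (e d : Int) (h : e ≠ d) :
    (pvStepA idx dez st e).1.getD d (-1) = st.1.getD d (-1) ∧
    (pvStepA idx dez st e).2.getD d [] = st.2.getD d [] := by
  unfold pvStepA
  split_ifs <;> simp_all [PySem.Dict.getD_insert, (Ne.symm h)]

lemma pvFold_getD_not_mem (idx : Int) (dez : List Int) (L : List Int) (st) (d : Int)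
    (h : d ∉ L) :
    ((L.foldl (pvStepA idx dez) st).1.getD d (-1) = st.1.getD d (-1)) ∧
    ((L.foldl (pvStepA idx dez) st).2.getD d [] = st.2.getD d []) := by
  induction L generalizing st with
  | nil => simp
  | cons e L ih =>
    simp only [List.mem_cons, not_or] at h
    have hs := pvStepA_getD_ne idx dez st e d (fun he => h.1 he.symm)
    simpa only [List.foldl_cons, hs.1, hs.2] using ih (pvStepA idx dez st e) h.2

lemma pvFold_getD_mem (idx : Int) (dez : List Int) (L : List Int) (st) (d : Int)
    (hnd : L.Nodup) (h : d ∈ L) :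
    ((L.foldl (pvStepA idx dez) st).1.getD d (-1) =
        if d ∈ dez then idx else st.1.getD d (-1)) ∧
    ((L.foldl (pvStepA idx dez) st).2.getD d [] =
        if d ∈ dez ∧ st.1.getD d (-1) ≠ -1
        then st.2.getD d [] ++ [idx - st.1.getD d (-1)]
        else st.2.getD d []) := by
  induction L generalizing st with
  | nil => simp at h
  | cons e L ih =>
    simp only [List.nodup_cons] at hnd
    rcases List.mem_cons.mp h with he | hL
    · subst he
      have hrest := pvFold_getD_not_mem idx dez L (pvStepA idx dez st d) d hnd.1
      simp only [List.foldl_cons, hrest.1, hrest.2]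
      unfold pvStepA
      by_cases hdz : d ∈ dez
      · by_cases hu : st.1.getD d (-1) = -1 <;>
          simp [hdz, hu]
      · simp [hdz]
    · have he : e ≠ d := fun hc => hnd.1 (hc ▸ hL)
      have hs := pvStepA_getD_ne idx dez st e d he
      simp only [List.foldl_cons]
      rw [(ih (pvStepA idx dez st e) hnd.2 hL).1, (ih (pvStepA idx dez st e) hnd.2 hL).2,
        hs.1, hs.2]
      exact ⟨rfl, rfl⟩

-- keys of both dicts stay 1..25 through the whole loop
lemma pvStepA_keys (idx : Int) (dez : List Int) (st) (d : Int)
    (h1 : st.1.contains d = true) (h2 : st.2.contains d = true) :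
    (pvStepA idx dez st d).1.keys = st.1.keys ∧
    (pvStepA idx dez st d).2.keys = st.2.keys := by
  unfold pvStepA
  split_ifs <;>
    simp_all [PySem.Dict.keys_insert_of_contains _ _ h1, PySem.Dict.keys_insert_of_contains _ _ h2]

lemma pvFold_keys (idx : Int) (dez : List Int) (L : List Int) (st)
    (h1 : ∀ d ∈ L, st.1.contains d = true) (h2 : ∀ d ∈ L, st.2.contains d = true) :
    ((L.foldl (pvStepA idx dez) st).1.keys = st.1.keys) ∧
    ((L.foldl (pvStepA idx dez) st).2.keys = st.2.keys) := by
  induction L generalizing st with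
  | nil => simp
  | cons e L ih =>
    have hk := pvStepA_keys idx dez st e (h1 e (by simp)) (h2 e (by simp))
    have := ih (pvStepA idx dez st e)
      (fun d hd => by
        rw [PySem.Dict.contains_eq_decide_mem_keys, hk.1,
          ← PySem.Dict.contains_eq_decide_mem_keys]; exact h1 d (by simp [hd]))
      (fun d hd => by
        rw [PySem.Dict.contains_eq_decide_mem_keys, hk.2,
          ← PySem.Dict.contains_eq_decide_mem_keys]; exact h2 d (by simp [hd]))
    simp only [List.foldl_cons, this.1, this.2, hk.1, hk.2]
    exact ⟨trivial, trivial⟩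

lemma pvInitU_keys : pvInitU.keys = PySem.List.pyRange 1 26 := by
  unfold pvInitU
  rw [PySem.Dict.keys_foldl_insert, PySem.Dict.keys_empty, PySem.Set.update_nil_left]
  decide

lemma pvInitD_keys : pvInitD.keys = PySem.List.pyRange 1 26 := by
  unfold pvInitD
  rw [PySem.Dict.keys_foldl_insert, PySem.Dict.keys_empty, PySem.Set.update_nil_left]
  decide

lemma pvOuter_keys (ps : List (Int × (Int × Int × List Int))) (st)
    (h1 : st.1.keys = PySem.List.pyRange 1 26) (h2 : st.2.keys = PySem.List.pyRange 1 26) :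
    ((ps.foldl (fun st p => (PySem.List.pyRange 1 26).foldl (pvStepA p.1 p.2.2.2) st) st).1.keys
        = PySem.List.pyRange 1 26) ∧
    ((ps.foldl (fun st p => (PySem.List.pyRange 1 26).foldl (pvStepA p.1 p.2.2.2) st) st).2.keys
        = PySem.List.pyRange 1 26) := by
  induction ps generalizing st with
  | nil => exact ⟨h1, h2⟩
  | cons p ps ih =>
    have hk := pvFold_keys p.1 p.2.2.2 (PySem.List.pyRange 1 26) st
      (fun d hd => by rw [PySem.Dict.contains_eq_decide_mem_keys, h1]; simp [hd])
      (fun d hd => by rw [PySem.Dict.contains_eq_decide_mem_keys, h2]; simp [hd])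
    rw [List.foldl_cons]
    exact ih _ (hk.1.trans h1) (hk.2.trans h2)

lemma pvLoopA_keys (jogos : List (Int × Int × List Int)) :
    (pvLoopA jogos).1.keys = PySem.List.pyRange 1 26 ∧
    (pvLoopA jogos).2.keys = PySem.List.pyRange 1 26 := by
  unfold pvLoopA
  exact pvOuter_keys (PySem.List.enumerate jogos) (pvInitU, pvInitD) pvInitU_keys pvInitD_keys

-- elements of pvPosB are enumerate indices, hence ≥ 0
lemma pvPosB_nonneg (jogos : List (Int × Int × List Int)) (d x : Int)
    (hx : x ∈ pvPosB jogos d) : 0 ≤ x := by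
  unfold pvPosB at hx
  obtain ⟨p, hp, hpx⟩ := List.mem_filterMap.mp hx
  obtain ⟨k, hk, rfl⟩ := (PySem.List.mem_enumerate_iff _ _ _).mp hp
  by_cases hc : d ∈ ((0 : Int) + (k : Int), jogos[k]).2.2.2
  · simp only [hc, if_pos] at hpx
    cases hpx
    omega
  · simp [hc] at hpx

lemma pvPosB_append (jogos : List (Int × Int × List Int)) (g : Int × Int × List Int) (d : Int) :
    pvPosB (jogos ++ [g]) d =
      pvPosB jogos d ++ (if d ∈ g.2.2 then [(jogos.length : Int)] else []) := by
  unfold pvPosB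
  rw [PySem.List.enumerate_append, List.filterMap_append]
  congr 1
  simp only [PySem.List.enumerate_cons, PySem.List.enumerate_nil,
    List.filterMap_cons, List.filterMap_nil]
  by_cases hg : d ∈ g.2.2 <;> simp [hg]

lemma pvLoopA_append (jogos : List (Int × Int × List Int)) (g : Int × Int × List Int) :
    pvLoopA (jogos ++ [g]) =
      (PySem.List.pyRange 1 26).foldl
        (pvStepA ((0 : Int) + (jogos.length : Int)) g.2.2) (pvLoopA jogos) := by
  unfold pvLoopA
  rw [PySem.List.enumerate_append, List.foldl_append]
  simp [PySem.List.enumerate_cons, PySem.List.enumerate_nil]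

-- the main invariant: A's two dicts, looked up at d, are B's last position / gaps
lemma pvMain (jogos : List (Int × Int × List Int)) (d : Int)
    (hd : d ∈ PySem.List.pyRange 1 26) :
    (pvLoopA jogos).1.getD d (-1) = ((pvPosB jogos d).getLast?).getD (-1) ∧
    (pvLoopA jogos).2.getD d [] = pvGaps (pvPosB jogos d) := by
  induction jogos using List.reverseRecOn with
  | nil =>
    have hpos : pvPosB [] d = [] := by
      simp [pvPosB, PySem.List.enumerate_nil]
    unfold pvLoopA pvInitU pvInitD
    rw [PySem.List.enumerate_nil, List.foldl_nil, hpos]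
    constructor
    · show PySem.Dict.getD (List.foldl _ _ _) d (-1) = _
      rw [pvGetD_foldl_insert_const]
      simp [hd]
    · show PySem.Dict.getD (List.foldl _ _ _) d [] = _
      rw [pvGetD_foldl_insert_const]
      simp [hd, pvGaps]
  | append_singleton jogos g ih =>
    have hnd : (PySem.List.pyRange 1 26).Nodup := by decide
    have hm := pvFold_getD_mem ((0 : Int) + (jogos.length : Int)) g.2.2
      (PySem.List.pyRange 1 26) (pvLoopA jogos) d hnd hd
    rw [pvLoopA_append, pvPosB_append]
    by_cases hg : d ∈ g.2.2
    · rw [if_pos hg]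
      by_cases hpos : pvPosB jogos d = []
      · have hu : (pvLoopA jogos).1.getD d (-1) = -1 := by rw [ih.1, hpos]; rfl
        constructor
        · rw [hm.1, if_pos hg, hpos]
          simp
        · rw [hm.2, if_neg (by simp [hu]), ih.2, hpos, pvGaps_append]
          simp
      · have hlast : (pvPosB jogos d).getLast? = some ((pvPosB jogos d).getLast hpos) :=
          List.getLast?_eq_some_getLast hpos
        have hnn : 0 ≤ (pvPosB jogos d).getLast hpos :=
          pvPosB_nonneg jogos d _ (List.getLast_mem hpos)
        have hu : (pvLoopA jogos).1.getD d (-1) = (pvPosB jogos d).getLast hpos := by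
          rw [ih.1, hlast]; rfl
        constructor
        · rw [hm.1, if_pos hg]
          simp
        · rw [hm.2, if_pos ⟨hg, by rw [hu]; omega⟩, ih.2, pvGaps_append, hlast, hu]
          simp
    · rw [if_neg hg]
      rw [hm.1, hm.2, if_neg hg, if_neg (by simp [hg]), List.append_nil]
      exact ih

-- ===== VERDICT (by name: the statement is the Claim_ definition above) =====
theorem distancia_entre_aparicoes_spec : Claim_equal_distancia_entre_aparicoes := by
  intro jogos _
  show distancia_entre_aparicoes jogos = distancia_entre_aparicoes_alt jogos
  simp only [distancia_entre_aparicoes, distancia_entre_aparicoes_alt]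
  rw [(pvLoopA_keys jogos).2]
  refine congrArg PySem.Dict.items ?_
  apply PySem.List.foldl_congr_mem
  intro acc x hx
  rw [PySem.List.slice_from _ (by norm_num : (0:Int) ≤ 1)]
  have h2 := (pvMain jogos x hx).2
  rw [h2]
  rfl
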